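-- pv_equiv track=rewrite | github.com/BoB-Sentinel-Solution/SeedDataset | Seed Dataset Fix/2/autofix_offsets.py | brute_force_norm_match
-- ===== SOURCE A (Python) =====
-- import unicodedata
-- from typing import Dict, Tuple, Optional, List
--
-- def normalize_for_compare(s: str, use_nfkc: bool, use_casefold: bool) -> str:
--     """비교용 정규화: NFC/NFKC + (옵션) casefold."""
--     if s is None:
--         return ""
--     t = unicodedata.normalize("NFKC" if use_nfkc else "NFC", s)
--     if use_casefold:
--         t = t.casefold()
--     return t
--
-- def brute_force_norm_match(text: str, value: str, prefer_begin: int, use_nfkc: bool, use_casefold: bool) -> Optional[Tuple[int,int]]: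
--     """
--     정규화 기반 근사 탐색:
--       - value[0]과 같은 지점을 후보 b로,
--       - e는 b+1..b+len(value)+8 범위에서 확장하며
--       - normalize(text[b:e]) == normalize(value) 인 첫 구간 채택.
--     """
--     if not value:
--         return None
--     nvalue = normalize_for_compare(value, use_nfkc, use_casefold)
--     n = len(text)
--     max_extra = 8
--     b_hits = []
--
--     first = value[0]
--     candidate_bs = []
--     pos = -1
--     while True:
--         pos = text.find(first, pos + 1)
--         if pos == -1:
--             break
--         candidate_bs.append(pos)
--
--     for b in candidate_bs:
--         min_e = b + 1
--         max_e = min(n, b + max(len(value),1) + max_extra)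
--         for e in range(min_e, max_e + 1):
--             if e - b < max(1, len(value) - max_extra):
--                 continue
--             slice_norm = normalize_for_compare(text[b:e], use_nfkc, use_casefold)
--             if slice_norm == nvalue:
--                 b_hits.append((b, e))
--                 break
--
--     if not b_hits:
--         return None
--     ref = prefer_begin if isinstance(prefer_begin, int) else 0
--     b, e = min(b_hits, key=lambda t: (abs(t[0] - ref), (t[1]-t[0])))
--     return b, e
-- ===== SOURCE B (Python) =====
-- import unicodedata
--
-- def brute_force_norm_match(text, value, prefer_begin, use_nfkc, use_casefold):
--     """Fixed-width scan: on normalization-stable (ASCII) text a normalized match must have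
--     exactly len(value) characters, so only the span (b, b+len(value)) is ever checked and the
--     nearest-to-ref winner is kept in a single pass (no hit list, no inner extension loop)."""
--     if not value:
--         return None
--     def norm(s):
--         t = unicodedata.normalize("NFKC" if use_nfkc else "NFC", s)
--         return t.casefold() if use_casefold else t
--     nvalue = norm(value)
--     m = len(value)
--     first = value[0]
--     ref = prefer_begin if isinstance(prefer_begin, int) else 0
--     best = None
--     for b in range(len(text) - m + 1):
--         if text[b] != first:
--             continue
--         if norm(text[b:b + m]) != nvalue:
--             continue
--         if best is None or abs(b - ref) < abs(best - ref):
--             best = b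
--     return None if best is None else (best, best + m)
-- ===== Notes on version B (the rewrite author's own statement) =====
-- stated objective: faster
-- what changed: B drops A's inner e-extension scan and its collect-all-hits-then-min() structure: since normalization is length-preserving on the domain, only the fixed-width span (b, b+len(value)) can match, so B does one pass over start positions keeping a running nearest-to-ref best.
import Mathlib
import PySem

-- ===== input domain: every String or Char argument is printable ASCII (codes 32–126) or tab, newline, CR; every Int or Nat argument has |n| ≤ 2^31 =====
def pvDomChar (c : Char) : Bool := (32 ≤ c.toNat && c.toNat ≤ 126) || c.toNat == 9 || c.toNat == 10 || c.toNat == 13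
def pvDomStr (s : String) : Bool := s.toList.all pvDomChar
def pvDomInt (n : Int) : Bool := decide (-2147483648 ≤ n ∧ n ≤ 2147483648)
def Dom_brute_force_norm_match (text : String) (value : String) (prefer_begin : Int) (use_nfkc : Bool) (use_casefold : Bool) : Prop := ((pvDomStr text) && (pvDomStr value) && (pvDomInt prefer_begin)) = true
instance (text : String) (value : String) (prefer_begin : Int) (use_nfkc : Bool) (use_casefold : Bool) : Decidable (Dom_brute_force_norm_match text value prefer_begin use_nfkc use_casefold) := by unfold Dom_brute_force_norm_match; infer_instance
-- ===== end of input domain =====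

-- B replaces A's collect-all-hits-with-inner-extension-scan + min() by a single fixed-width
-- pass keeping a running best start (normalization is length-preserving on the ASCII domain);
-- objective: faster (the inner e-extension loop and the hit list disappear).

-- normalize_for_compare, shared verbatim by A and by B's local `norm`:
-- unicodedata.normalize("NFC"/"NFKC", s) is the identity on the ASCII domain and
-- s.casefold() is charwise lower there — exact on the stated ASCII domain.
def pvNormalize (use_nfkc : Bool) (use_casefold : Bool) (s : List Char) : List Char :=
  let t := s  -- NFC/NFKC: identity on ASCII (use_nfkc only selects between the two identities)
  if use_casefold then PySem.Chars.lower t else t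

-- ===== PORT A =====
-- the `while True: pos = text.find(first, pos+1)` candidate-collection loop;
-- the fuel argument only makes the loop total (text.length + 1 always suffices)
def pvCandLoop (t : List Char) (c : Char) : Nat → Int → List Int
  | 0, _ => []
  | fuel + 1, pos =>
      let p := PySem.Chars.findFrom t [c] (pos + 1)
      if p = -1 then [] else p :: pvCandLoop t c fuel p

-- the `for e in range(min_e, max_e+1)` extension scan for one candidate b (first hit wins)
def pvScanE (t nv : List Char) (use_nfkc use_casefold : Bool) (vlen : Nat) (b : Int) :
    List Int → Option (Int × Int)
  | [] => none
  | e :: rest =>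
      if e - b < max 1 ((vlen : Int) - 8) then pvScanE t nv use_nfkc use_casefold vlen b rest
      else if pvNormalize use_nfkc use_casefold (PySem.List.slice t (some b) (some e)) = nv then
        some (b, e)
      else pvScanE t nv use_nfkc use_casefold vlen b rest

def brute_force_norm_match (text : String) (value : String) (prefer_begin : Int) (use_nfkc : Bool) (use_casefold : Bool) : Option (Int × Int) :=
  let tv := text.toList
  match value.toList with
  | [] => none
  | first :: _ =>
      let vv := value.toList
      let nvalue := pvNormalize use_nfkc use_casefold vv
      let n : Int := tv.length
      let candidate_bs := pvCandLoop tv first (tv.length + 1) (-1)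
      let b_hits := candidate_bs.foldl (fun acc b =>
        match pvScanE tv nvalue use_nfkc use_casefold vv.length b
            (PySem.List.pyRange (b + 1) (min n (b + max (vv.length : Int) 1 + 8) + 1) 1) with
        | some h => acc ++ [h]
        | none => acc) []
      if b_hits = [] then none
      else
        let ref := prefer_begin
        PySem.List.min2? b_hits (fun t => |t.1 - ref|) (fun t => t.2 - t.1)

-- ===== PORT B =====
-- the `best is None or abs(b-ref) < abs(best-ref)` update
def pvBestStep (ref : Int) (best : Option Int) (b : Int) : Option Int :=
  match best with
  | none => some b
  | some bb => if |b - ref| < |bb - ref| then some b else best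

def brute_force_norm_match_alt (text : String) (value : String) (prefer_begin : Int) (use_nfkc : Bool) (use_casefold : Bool) : Option (Int × Int) :=
  let tv := text.toList
  match value.toList with
  | [] => none
  | first :: _ =>
      let vv := value.toList
      let nvalue := pvNormalize use_nfkc use_casefold vv
      let m : Int := vv.length
      let ref := prefer_begin
      let best := (PySem.List.pyRange 0 ((tv.length : Int) - m + 1) 1).foldl (fun best b =>
        if PySem.List.pyGet? tv b ≠ some first then best
        else if pvNormalize use_nfkc use_casefold (PySem.List.slice tv (some b) (some (b + m))) ≠ nvalue then best
        else pvBestStep ref best b) none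
      match best with
      | none => none
      | some b => some (b, b + m)

-- ===== PRECONDITION & SPEC =====
def Spec_brute_force_norm_match (text : String) (value : String) (prefer_begin : Int) (use_nfkc : Bool) (use_casefold : Bool) (out : Option (Int × Int)) : Prop := out = brute_force_norm_match_alt text value prefer_begin use_nfkc use_casefold
instance (text : String) (value : String) (prefer_begin : Int) (use_nfkc : Bool) (use_casefold : Bool) (out : Option (Int × Int)) : Decidable (Spec_brute_force_norm_match text value prefer_begin use_nfkc use_casefold out) := by unfold Spec_brute_force_norm_match; infer_instance

-- ===== CLAIM (what is proved, stated in full; the proofs are below) =====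
def Claim_equal_brute_force_norm_match : Prop := ∀ (text : String) (value : String) (prefer_begin : Int) (use_nfkc : Bool) (use_casefold : Bool), Dom_brute_force_norm_match text value prefer_begin use_nfkc use_casefold → Spec_brute_force_norm_match text value prefer_begin use_nfkc use_casefold (brute_force_norm_match text value prefer_begin use_nfkc use_casefold)

-- ===== LEMMAS AND PROOFS =====

theorem pvNormalize_length (nf cf : Bool) (s : List Char) :
    (pvNormalize nf cf s).length = s.length := by
  unfold pvNormalize PySem.Chars.lower
  split <;> simp

theorem pvSingle_prefix (c : Char) (l : List Char) : [c] <+: l ↔ l.head? = some c := by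
  cases l with
  | nil => simp
  | cons a t => simp [List.cons_prefix_cons, eq_comm]

theorem pvSingle_prefix_drop (c : Char) (tv : List Char) (i : Nat) :
    [c] <+: tv.drop i ↔ tv[i]? = some c := by
  rw [pvSingle_prefix, List.head?_drop]

-- splitting a filtered interval at its first accepted element
theorem pvFilter_range'_split (P : Nat → Bool) (s q len : Nat) (hsq : s ≤ q) (hq : q < len)
    (hPq : P q = true) (hmin : ∀ i, s ≤ i → i < q → P i = false) :
    (List.range' s (len - s)).filter P = q :: (List.range' (q + 1) (len - (q + 1))).filter P := by
  have hsplit : List.range' s (q - s) ++ List.range' q (len - q) = List.range' s (len - s) := by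
    have h := List.range'_append (s := s) (m := q - s) (n := len - q) (step := 1)
    have h1 : s + 1 * (q - s) = q := by omega
    have h2 : q - s + (len - q) = len - s := by omega
    rw [h1, h2] at h
    exact h
  rw [← hsplit, List.filter_append]
  have h1 : (List.range' s (q - s)).filter P = [] := by
    rw [List.filter_eq_nil_iff]
    intro a ha
    rw [List.mem_range'_1] at ha
    simp [hmin a ha.1 (by omega)]
  have h2 : List.range' q (len - q) = q :: List.range' (q + 1) (len - (q + 1)) := by
    have : len - q = (len - (q + 1)) + 1 := by omega
    rw [this, List.range'_succ]
  rw [h1, h2]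
  simp [hPq]

-- the candidate-collection loop yields exactly the indices of `c` at or beyond `s`
theorem pvCandLoop_eq (tv : List Char) (c : Char) :
    ∀ (fuel s : Nat) (pos : Int), pos + 1 = (s : Int) → s ≤ tv.length → tv.length ≤ fuel + s →
    pvCandLoop tv c fuel pos
      = ((List.range' s (tv.length - s)).filter (fun i => tv[i]? == some c)).map (fun i : Nat => (i : Int)) := by
  intro fuel
  induction fuel with
  | zero =>
      intro s pos hpos hs hfuel
      have : tv.length - s = 0 := by omega
      simp [pvCandLoop, this]
  | succ fuel ih =>
      intro s pos hpos hs hfuel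
      unfold pvCandLoop
      rw [hpos]
      by_cases hp : PySem.Chars.findFrom tv [c] (s : Int) = -1
      · have hno : ¬ [c] <:+: tv.drop s :=
          (PySem.Chars.findFrom_natCast_eq_neg_one_iff tv [c] s hs).mp hp
        rw [List.singleton_infix_iff] at hno
        have hfil : (List.range' s (tv.length - s)).filter (fun i => tv[i]? == some c) = [] := by
          rw [List.filter_eq_nil_iff]
          intro i hi
          rw [List.mem_range'_1] at hi
          simp only [beq_iff_eq]
          intro hc
          apply hno
          have : (tv.drop s)[i - s]? = some c := by
            rw [List.getElem?_drop]
            have : s + (i - s) = i := by omega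
            rw [this]; exact hc
          exact List.mem_of_getElem? this
        simp [hp, hfil]
      · obtain ⟨hge, hpre, hminp⟩ := PySem.Chars.findFrom_natCast_spec tv [c] s hs hp
        set p := PySem.Chars.findFrom tv [c] (s : Int) with hpdef
        have hp0 : 0 ≤ p := le_trans (by exact_mod_cast Nat.zero_le s) hge
        have hcq : tv[p.toNat]? = some c := (pvSingle_prefix_drop c tv p.toNat).mp hpre
        have hqlen : p.toNat < tv.length := by
          by_contra hcon
          rw [List.getElem?_eq_none (by omega)] at hcq
          simp at hcq
        have hsq : s ≤ p.toNat := by omega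
        have hkey : (List.range' s (tv.length - s)).filter (fun i => tv[i]? == some c)
            = p.toNat :: (List.range' (p.toNat + 1) (tv.length - (p.toNat + 1))).filter
                (fun i => tv[i]? == some c) := by
          apply pvFilter_range'_split _ s p.toNat tv.length hsq hqlen (by simp [hcq])
          intro i h1 h2
          rw [beq_eq_false_iff_ne]
          intro hc
          exact hminp i h1 h2 ((pvSingle_prefix_drop c tv i).mpr hc)
        have hrec := ih (p.toNat + 1) p (by omega) (by omega) (by omega)
        simp only [hp, if_false, hkey, List.map_cons, hrec]
        congr 1
        exact (Int.toNat_of_nonneg hp0).symm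

-- the extension scan for one candidate succeeds only at e = b + m (widths must agree)
theorem pvScanE_eq (tv nv : List Char) (nf cf : Bool) (m : Nat) (hm1 : 1 ≤ m)
    (hnv : nv.length = m) (b : Int) (hb : 0 ≤ b) :
    ∀ (l : List Int), (∀ e ∈ l, b ≤ e ∧ e ≤ (tv.length : Int)) →
    pvScanE tv nv nf cf m b l
      = if (b + m) ∈ l ∧ pvNormalize nf cf ((tv.drop b.toNat).take m) = nv
        then some (b, b + m) else none := by
  intro l
  induction l with
  | nil => intro _; simp [pvScanE]
  | cons e rest ih =>
      intro hmem
      obtain ⟨hbe, helen⟩ := hmem e (List.mem_cons_self ..)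
      have hrest := ih (fun x hx => hmem x (List.mem_cons_of_mem _ hx))
      have hslice : PySem.List.slice tv (some b) (some e)
          = (tv.drop b.toNat).take (e.toNat - b.toNat) :=
        PySem.List.slice_toNat tv hb (le_trans hb hbe)
      by_cases hcase : e = b + m
      · have hskip : ¬ (e - b < max 1 ((m : Int) - 8)) := by
          subst hcase; simp only [add_sub_cancel_left]
          rcases max_cases 1 ((m : Int) - 8) with ⟨h, _⟩ | ⟨h, _⟩ <;> omega
        have htonat : e.toNat - b.toNat = m := by omega
        unfold pvScanE
        rw [if_neg hskip, hslice, htonat]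
        by_cases hmatch : pvNormalize nf cf ((tv.drop b.toNat).take m) = nv
        · rw [if_pos hmatch, if_pos ⟨by simp [hcase], hmatch⟩, hcase]
        · rw [if_neg hmatch, hrest, if_neg (by intro h; exact hmatch h.2),
            if_neg (by intro h; exact hmatch h.2)]
      · have hne : pvNormalize nf cf (PySem.List.slice tv (some b) (some e)) ≠ nv := by
          intro hcon
          have hlen := congrArg List.length hcon
          rw [pvNormalize_length, hslice] at hlen
          simp only [List.length_take, List.length_drop, hnv] at hlen
          omega
        unfold pvScanE
        rw [hrest]
        have hmem' : (b + m) ∈ e :: rest ↔ (b + m) ∈ rest := by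
          simp [List.mem_cons, (Ne.symm hcase : b + (m : Int) ≠ e)]
        by_cases hskip : e - b < max 1 ((m : Int) - 8)
        · rw [if_pos hskip]
          congr 1
          simp [hmem']
        · rw [if_neg hskip, if_neg hne]
          congr 1
          simp [hmem']

-- collect-into-a-list loop is filterMap
theorem pvFoldl_optAppend {α β : Type} (body : List β → α → List β) (o : α → Option β)
    (hbody : ∀ acc x, body acc x = match o x with | some h => acc ++ [h] | none => acc) :
    ∀ (l : List α) (acc : List β), l.foldl body acc = acc ++ l.filterMap o := by
  intro l
  induction l with
  | nil => simp
  | cons x t ih =>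
      intro acc
      cases ho : o x <;> simp [List.foldl_cons, hbody acc x, ho, ih]

-- Python's min-with-key step, written out
def pvMinStep (ref : Int) (acc : Option (Int × Int)) (x : Int × Int) : Option (Int × Int) :=
  match acc with
  | none => some x
  | some m =>
    if (decide (|x.1 - ref| < |m.1 - ref|)
        || (!decide (|m.1 - ref| < |x.1 - ref|) && decide (x.2 - x.1 < m.2 - m.1))) = true
    then some x else some m

theorem pvMin2_eq_foldl (xs : List (Int × Int)) (ref : Int) :
    PySem.List.min2? xs (fun t => |t.1 - ref|) (fun t => t.2 - t.1)
      = xs.foldl (pvMinStep ref) none := by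
  unfold PySem.List.min2?
  apply PySem.List.foldl_congr_mem
  intro acc x _
  cases acc <;> rfl

-- min(list-of-equal-width-spans, key=(dist, width)) is the running-best fold over the starts
theorem pvBest_map (ref mi : Int) (G : List Int) :
    ∀ (acc : Option Int),
    (G.map (fun b => (b, b + mi))).foldl (pvMinStep ref) (acc.map (fun b => (b, b + mi)))
      = (G.foldl (pvBestStep ref) acc).map (fun b => (b, b + mi)) := by
  induction G with
  | nil => intro acc; simp
  | cons b t ih =>
      intro acc
      cases acc with
      | none => simpa using ih (some b)
      | some bb =>
          simp only [List.map_cons, List.foldl_cons, Option.map_some]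
          by_cases hlt : |b - ref| < |bb - ref|
          · have h1 : pvMinStep ref (some (bb, bb + mi)) (b, b + mi) = some (b, b + mi) := by
              simp [pvMinStep, hlt]
            have h2 : pvBestStep ref (some bb) b = some b := by simp [pvBestStep, hlt]
            rw [h1, h2]
            simpa using ih (some b)
          · have h1 : pvMinStep ref (some (bb, bb + mi)) (b, b + mi) = some (bb, bb + mi) := by
              simp [pvMinStep, hlt]
            have h2 : pvBestStep ref (some bb) b = some bb := by simp [pvBestStep, hlt]
            rw [h1, h2]
            simpa using ih (some bb)

theorem pvBest_map_none (ref mi : Int) (G : List Int) :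
    (G.map (fun b => (b, b + mi))).foldl (pvMinStep ref) none
      = (G.foldl (pvBestStep ref) none).map (fun b => (b, b + mi)) := by
  simpa using pvBest_map ref mi G none

-- the two per-index acceptance filters coincide (B only scans starts that fit)
theorem pvRange_filter_fit (len m : Nat) (hm : 1 ≤ m) (P : Nat → Bool) :
    (List.range len).filter (fun q => decide (q + m ≤ len) && P q)
      = (List.range (len + 1 - m)).filter P := by
  have hsplit : List.range len = List.range (len + 1 - m) ++ List.range' (len + 1 - m) (len - (len + 1 - m)) := by
    have h := List.range'_append (s := 0) (m := len + 1 - m) (n := len - (len + 1 - m)) (step := 1)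
    have h1 : 0 + 1 * (len + 1 - m) = len + 1 - m := by omega
    have h2 : len + 1 - m + (len - (len + 1 - m)) = len := by omega
    rw [h1, h2] at h
    rw [List.range_eq_range' (n := len), List.range_eq_range' (n := len + 1 - m)]
    exact h.symm
  rw [hsplit, List.filter_append]
  have h2 : (List.range' (len + 1 - m) (len - (len + 1 - m))).filter
      (fun q => decide (q + m ≤ len) && P q) = [] := by
    rw [List.filter_eq_nil_iff]
    intro a ha
    rw [List.mem_range'_1] at ha
    simp only [Bool.and_eq_true, decide_eq_true_eq, not_and]
    intro hle
    omega
  rw [h2, List.append_nil]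
  apply List.filter_congr
  intro q hq
  rw [List.mem_range] at hq
  have : (q + m ≤ len) := by omega
  simp [this]

-- the whole pipeline of A equals the whole pipeline of B, for a non-empty value list
theorem pvMain_eq (tv : List Char) (nf cf : Bool) (first : Char) (vrest : List Char) (ref : Int) :
    (if ((pvCandLoop tv first (tv.length + 1) (-1)).foldl (fun acc b =>
          match pvScanE tv (pvNormalize nf cf (first :: vrest)) nf cf (first :: vrest).length b
              (PySem.List.pyRange (b + 1)
                (min (tv.length : Int) (b + max ((first :: vrest).length : Int) 1 + 8) + 1) 1) with
          | some h => acc ++ [h]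
          | none => acc) []) = [] then none
     else PySem.List.min2? ((pvCandLoop tv first (tv.length + 1) (-1)).foldl (fun acc b =>
          match pvScanE tv (pvNormalize nf cf (first :: vrest)) nf cf (first :: vrest).length b
              (PySem.List.pyRange (b + 1)
                (min (tv.length : Int) (b + max ((first :: vrest).length : Int) 1 + 8) + 1) 1) with
          | some h => acc ++ [h]
          | none => acc) []) (fun t => |t.1 - ref|) (fun t => t.2 - t.1))
    = (match (PySem.List.pyRange 0 ((tv.length : Int) - ((first :: vrest).length : Int) + 1) 1).foldl
          (fun best b =>
            if PySem.List.pyGet? tv b ≠ some first then best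
            else if pvNormalize nf cf
                (PySem.List.slice tv (some b) (some (b + ((first :: vrest).length : Int)))) ≠
                  pvNormalize nf cf (first :: vrest) then best
            else pvBestStep ref best b) none with
       | none => none
       | some b => some (b, b + ((first :: vrest).length : Int))) := by
  set nv := pvNormalize nf cf (first :: vrest) with hnvdef
  set M := (first :: vrest).length with hMdef
  set len := tv.length with hlendef
  have hm1 : 1 ≤ M := by simp [hMdef]
  have hnvlen : nv.length = M := by rw [hnvdef, hMdef, pvNormalize_length]
  -- the per-start acceptance test
  set P : Nat → Bool := fun q => (tv[q]? == some first)
      && (pvNormalize nf cf ((tv.drop q).take M) == nv) with hPdef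
  set G : List Nat := (List.range (len + 1 - M)).filter P with hGdef
  -- ===== A side =====
  have hcand : pvCandLoop tv first (len + 1) (-1)
      = ((List.range len).filter (fun i => tv[i]? == some first)).map (fun i : Nat => (i : Int)) := by
    rw [pvCandLoop_eq tv first (len + 1) 0 (-1) (by norm_num) (Nat.zero_le _) (by omega)]
    rw [List.range_eq_range']
    simp only [Nat.sub_zero]
    rfl
  have hscan : ∀ q : Nat,
      pvScanE tv nv nf cf M (q : Int)
        (PySem.List.pyRange ((q : Int) + 1) (min (len : Int) ((q : Int) + max (M : Int) 1 + 8) + 1) 1)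
      = if (decide (q + M ≤ len) && (pvNormalize nf cf ((tv.drop q).take M) == nv))
        then some ((q : Int), (q : Int) + M) else none := by
    intro q
    have hmax : max (M : Int) 1 = (M : Int) := by
      apply max_eq_left; exact_mod_cast hm1
    rw [hmax]
    rw [pvScanE_eq tv nv nf cf M hm1 hnvlen (q : Int) (by positivity) _ ?hmem]
    case hmem =>
      intro e he
      rw [PySem.List.mem_pyRange_one] at he
      constructor
      · omega
      · have := min_le_left (len : Int) ((q : Int) + M + 8)
        omega
    simp only [Int.toNat_natCast]
    have hmem : ((q : Int) + M) ∈ PySem.List.pyRange ((q : Int) + 1)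
        (min (len : Int) ((q : Int) + (M : Int) + 8) + 1) 1 ↔ q + M ≤ len := by
      rw [PySem.List.mem_pyRange_one]
      have := min_le_left (len : Int) ((q : Int) + M + 8)
      have := min_le_right (len : Int) ((q : Int) + M + 8)
      constructor
      · intro ⟨h1, h2⟩; omega
      · intro h
        refine ⟨by omega, ?_⟩
        have : min (len : Int) ((q : Int) + M + 8) = if (len : Int) ≤ (q : Int) + M + 8 then (len : Int) else (q : Int) + M + 8 := by
          rw [min_def]
        omega
    simp only [hmem]
    by_cases h1 : q + M ≤ len <;> by_cases h2 : pvNormalize nf cf ((tv.drop q).take M) = nv <;>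
      simp [h1, h2]
  have hhits : ((pvCandLoop tv first (len + 1) (-1)).foldl (fun acc b =>
        match pvScanE tv nv nf cf M b
            (PySem.List.pyRange (b + 1) (min (len : Int) (b + max (M : Int) 1 + 8) + 1) 1) with
        | some h => acc ++ [h]
        | none => acc) [])
      = (G.map (fun q : Nat => (q : Int))).map (fun b => (b, b + (M : Int))) := by
    refine (pvFoldl_optAppend _ (fun b : Int => pvScanE tv nv nf cf M b
        (PySem.List.pyRange (b + 1) (min ((len : Int)) (b + max ((M : Int)) 1 + 8) + 1) 1))
      ?_ (pvCandLoop tv first (len + 1) (-1)) []).trans ?_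
    · intro acc b
      cases h : pvScanE tv nv nf cf M b
          (PySem.List.pyRange (b + 1) (min ((len : Int)) (b + max ((M : Int)) 1 + 8) + 1) 1) <;>
        simp [h]
    rw [List.nil_append, hcand, List.filterMap_map]
    have hcong : ∀ q ∈ (List.range len).filter (fun i => tv[i]? == some first),
        ((fun b => pvScanE tv nv nf cf M b
            (PySem.List.pyRange (b + 1) (min (len : Int) (b + max (M : Int) 1 + 8) + 1) 1))
          ∘ (fun i : Nat => (i : Int))) q
        = (fun q : Nat => if (decide (q + M ≤ len) && (pvNormalize nf cf ((tv.drop q).take M) == nv))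
            then some ((q : Int), (q : Int) + M) else none) q := by
      intro q _
      exact hscan q
    rw [List.filterMap_congr hcong]
    have hswap : ((List.range len).filter (fun i => tv[i]? == some first)).filterMap
        (fun q : Nat => if (decide (q + M ≤ len) && (pvNormalize nf cf ((tv.drop q).take M) == nv))
            then some ((q : Int), (q : Int) + M) else none)
        = ((List.range len).filter (fun q => decide (q + M ≤ len) && P q)).filterMap
            (fun q : Nat => some ((q : Int), (q : Int) + M)) := by
      rw [List.filterMap_filter, List.filterMap_filter]
      apply List.filterMap_congr
      intro q _
      by_cases ha : tv[q]? = some first <;>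
        by_cases hb : q + M ≤ len <;>
        by_cases hc : pvNormalize nf cf ((tv.drop q).take M) = nv <;>
        simp [hPdef, ha, hb, hc]
    rw [hswap, pvRange_filter_fit len M hm1 P, ← hGdef, List.map_map]
    have hfme : ∀ (l : List Nat),
        l.filterMap (fun q : Nat => some ((q : Int), (q : Int) + (M : Int)))
          = l.map (fun q : Nat => ((q : Int), (q : Int) + (M : Int))) := by
      intro l
      induction l with
      | nil => rfl
      | cons a t ih => simp [ih]
    rw [hfme G]
    rfl
  -- ===== B side =====
  have hstep : (fun (best : Option Int) (b : Int) =>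
      if PySem.List.pyGet? tv b ≠ some first then best
      else if pvNormalize nf cf (PySem.List.slice tv (some b) (some (b + (M : Int)))) ≠ nv then best
      else pvBestStep ref best b)
      = (fun (best : Option Int) (b : Int) =>
          if ((PySem.List.pyGet? tv b == some first)
              && (pvNormalize nf cf (PySem.List.slice tv (some b) (some (b + (M : Int)))) == nv))
          then pvBestStep ref best b else best) := by
    funext best b
    by_cases h1 : PySem.List.pyGet? tv b = some first <;>
      by_cases h2 : pvNormalize nf cf (PySem.List.slice tv (some b) (some (b + (M : Int)))) = nv <;>
      simp [h1, h2]
  have hbfilter : (PySem.List.pyRange 0 ((len : Int) - (M : Int) + 1) 1).filter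
      (fun b => (PySem.List.pyGet? tv b == some first)
          && (pvNormalize nf cf (PySem.List.slice tv (some b) (some (b + (M : Int)))) == nv))
      = G.map (fun q : Nat => (q : Int)) := by
    rw [PySem.List.pyRange_one, List.filter_map]
    have hN : (((len : Int) - (M : Int) + 1) - 0).toNat = len + 1 - M := by omega
    rw [hN]
    congr 1
    case e_f => funext q; simp
    rw [hGdef]
    apply List.filter_congr
    intro q hq
    rw [List.mem_range] at hq
    simp only [Function.comp_apply, zero_add, PySem.List.pyGet?_natCast]
    rw [show ((q : Int) + (M : Int)) = (((q : Nat) : Int) + ((M : Nat) : Int)) from rfl,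
      PySem.List.slice_natCast_add]
  have hbest : (PySem.List.pyRange 0 ((len : Int) - (M : Int) + 1) 1).foldl
      (fun best b =>
        if PySem.List.pyGet? tv b ≠ some first then best
        else if pvNormalize nf cf (PySem.List.slice tv (some b) (some (b + (M : Int)))) ≠ nv then best
        else pvBestStep ref best b) none
      = (G.map (fun q : Nat => (q : Int))).foldl (pvBestStep ref) none := by
    rw [hstep, ← List.foldl_filter, hbfilter]
  rw [hhits, hbest]
  -- ===== both sides are the best-fold, mapped to spans =====
  rw [pvMin2_eq_foldl, pvBest_map_none]
  rcases hGcase : G with _ | ⟨g0, gtail⟩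
  · simp
  · rw [if_neg (by simp)]
    cases hfold : ((g0 :: gtail).map (fun q : Nat => (q : Int))).foldl (pvBestStep ref) none with
    | none => simp
    | some b => simp

-- ===== VERDICT (by name: the statement is the Claim_ definition above) =====
theorem brute_force_norm_match_spec : Claim_equal_brute_force_norm_match := by
  intro text value ref nf cf _
  unfold Spec_brute_force_norm_match brute_force_norm_match brute_force_norm_match_alt
  cases hv : value.toList with
  | nil => simp
  | cons first vrest =>
      exact pvMain_eq text.toList nf cf first vrest ref
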